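-- pv_equiv track=rewrite | github.com/JN-Jeong/Coding | 백준/부분합_1806.py | divsum
-- ===== SOURCE A (Python) =====
-- def divsum(N):
--     result = 0
--     for i in range(1, N):
--         ls = list(map(int, str(i)))
--
--         result = i + sum(ls)
--         if result == N:
--             return i
--     return 0
-- ===== SOURCE B (Python) =====
-- def divsum(N):
--     # Only i in [N-90, N) can satisfy i + digitsum(i) == N (digit sum of a
--     # 32-bit int is at most 90), so scan just that window, smallest first.
--     for i in range(max(1, N - 90), N):
--         s = 0
--         m = i
--         while m > 0:
--             s += m % 10
--             m //= 10
--         if i + s == N: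
--             return i
--     return 0
-- ===== Notes on version B (the rewrite author's own statement) =====
-- stated objective: faster
-- what changed: B scans only the window [max(1,N-90), N) justified by the bound digitsum(i) <= 90 for any i in the domain, and computes the digit sum arithmetically (%10, //10) instead of building str(i) and mapping int over its characters, removing the O(N)-length scan.
import Mathlib
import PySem

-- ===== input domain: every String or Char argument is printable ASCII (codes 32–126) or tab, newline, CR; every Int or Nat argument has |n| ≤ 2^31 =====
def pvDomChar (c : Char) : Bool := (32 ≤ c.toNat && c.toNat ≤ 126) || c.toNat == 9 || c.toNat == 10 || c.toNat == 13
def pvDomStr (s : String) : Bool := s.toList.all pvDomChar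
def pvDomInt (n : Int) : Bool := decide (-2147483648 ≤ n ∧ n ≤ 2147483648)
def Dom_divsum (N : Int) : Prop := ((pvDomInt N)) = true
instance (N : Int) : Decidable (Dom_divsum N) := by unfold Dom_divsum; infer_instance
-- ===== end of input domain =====

-- B scans only the window [max(1,N-90), N) (digit sum of any int in the domain is at most 90) and takes
-- the digit sum arithmetically instead of via str(i); proved equal to A on the whole domain.


-- ===== PORT A =====
-- int(c) for a one-character string; exact on the digit characters str(i), i ≥ 1, produces
def chInt (c : Char) : Int := (PySem.Int.ofChars? [c]).getD 0

-- the 'for i in range(1, N)' loop with its early return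
def divsumLoopA (N : Int) : List Int → Int
  | [] => 0
  | i :: rest =>
    let ls := (PySem.Int.toChars i).map chInt     -- ls = list(map(int, str(i)))
    let result := i + ls.sum                      -- result = i + sum(ls)
    if result = N then i else divsumLoopA N rest
def divsum (N : Int) : Int := divsumLoopA N (PySem.List.pyRange 1 N 1)

-- ===== PORT B =====
-- the 'while m > 0' digit-sum loop (entered only for m > 0, so ported on Nat)
def digitSumB (m : Nat) : Int :=
  if h : m = 0 then 0
  else ((m % 10 : Nat) : Int) + digitSumB (m / 10)
decreasing_by exact Nat.div_lt_self (Nat.pos_of_ne_zero h) (by omega)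

-- the 'for i in range(max(1, N - 90), N)' loop with its early return
def divsumLoopB (N : Int) : List Int → Int
  | [] => 0
  | i :: rest => if i + digitSumB i.toNat = N then i else divsumLoopB N rest
def divsum_alt (N : Int) : Int := divsumLoopB N (PySem.List.pyRange (max 1 (N - 90)) N 1)

-- ===== PRECONDITION & SPEC =====
def Spec_divsum (N : Int) (out : Int) : Prop := out = divsum_alt N
instance (N : Int) (out : Int) : Decidable (Spec_divsum N out) := by unfold Spec_divsum; infer_instance

-- ===== CLAIM (what is proved, stated in full; the proofs are below) =====
def Claim_equal_divsum : Prop := ∀ (N : Int), Dom_divsum N → Spec_divsum N (divsum N)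

-- ===== LEMMAS AND PROOFS =====

lemma chInt_digitChar (d : Nat) (h : d < 10) : chInt (Nat.digitChar d) = (d : Int) := by
  interval_cases d <;> decide

lemma digitSumB_zero : digitSumB 0 = 0 := by
  rw [digitSumB]; simp

lemma digitSumB_pos (m : Nat) (h : m ≠ 0) :
    digitSumB m = ((m % 10 : Nat) : Int) + digitSumB (m / 10) := by
  rw [digitSumB]; simp [h]

lemma toDigitsCore_sum : ∀ (f n : Nat) (acc : List Char), n < f →
    ((Nat.toDigitsCore 10 f n acc).map chInt).sum = digitSumB n + (acc.map chInt).sum := by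
  intro f
  induction f with
  | zero => intro n acc h; omega
  | succ f ih =>
    intro n acc h
    rw [Nat.toDigitsCore]
    by_cases h10 : n / 10 = 0
    · simp only [h10, if_true, List.map_cons, List.sum_cons]
      rw [chInt_digitChar (n % 10) (Nat.mod_lt _ (by omega))]
      rcases Nat.eq_zero_or_pos n with hz | hp
      · subst hz; simp [digitSumB_zero]
      · rw [digitSumB_pos n (by omega), h10, digitSumB_zero, add_assoc]
        simp
    · simp only [h10, if_false]
      have hn : n ≠ 0 := by
        intro hz; subst hz; simp at h10
      have hlt : n / 10 < f :=
        Nat.lt_of_lt_of_le (Nat.div_lt_self (Nat.pos_of_ne_zero hn) (by omega)) (by omega)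
      rw [ih (n / 10) (Nat.digitChar (n % 10) :: acc) hlt]
      simp only [List.map_cons, List.sum_cons]
      rw [chInt_digitChar (n % 10) (Nat.mod_lt _ (by omega))]
      rw [digitSumB_pos n hn]
      ring

lemma strsum_eq (i : Int) (h : 0 ≤ i) :
    ((PySem.Int.toChars i).map chInt).sum = digitSumB i.toNat := by
  rw [PySem.Int.toChars, if_neg (by omega), Nat.toDigits]
  rw [toDigitsCore_sum (i.toNat + 1) i.toNat [] (by omega)]
  simp

lemma digitSumB_le : ∀ (k m : Nat), m < 10 ^ k → digitSumB m ≤ 9 * k := by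
  intro k
  induction k with
  | zero => intro m h; interval_cases m; simp [digitSumB_zero]
  | succ k ih =>
    intro m h
    by_cases hz : m = 0
    · subst hz; rw [digitSumB_zero]; positivity
    · rw [digitSumB_pos m hz]
      have h1 : digitSumB (m / 10) ≤ 9 * k := by
        apply ih
        rw [pow_succ] at h
        omega
      have h2 : ((m % 10 : Nat) : Int) ≤ 9 := by
        have := Nat.mod_lt m (show 0 < 10 by omega)
        omega
      push_cast
      push_cast at h1
      omega

lemma loopA_append (N : Int) (xs ys : List Int)
    (h : ∀ i ∈ xs, i + ((PySem.Int.toChars i).map chInt).sum ≠ N) :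
    divsumLoopA N (xs ++ ys) = divsumLoopA N ys := by
  induction xs with
  | nil => simp
  | cons i rest ih =>
    simp only [List.cons_append, divsumLoopA]
    rw [if_neg (h i (by simp))]
    exact ih (fun j hj => h j (by simp [hj]))

lemma loopA_eq_loopB (N : Int) (xs : List Int) (h : ∀ i ∈ xs, 0 ≤ i) :
    divsumLoopA N xs = divsumLoopB N xs := by
  induction xs with
  | nil => rfl
  | cons i rest ih =>
    simp only [divsumLoopA, divsumLoopB]
    rw [strsum_eq i (h i (by simp))]
    rw [ih (fun j hj => h j (by simp [hj]))]

-- ===== VERDICT (by name: the statement is the Claim_ definition above) =====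
theorem divsum_spec : Claim_equal_divsum := by
  intro N hdom
  unfold Spec_divsum divsum divsum_alt
  have hdom' : N ≤ 2147483648 := by
    simp [Dom_divsum, pvDomInt] at hdom; omega
  set S := max 1 (N - 90) with hS
  by_cases hN : N ≤ 1
  · rw [PySem.List.pyRange_one_eq_nil hN, PySem.List.pyRange_one_eq_nil (by omega)]; rfl
  · have h1S : (1 : Int) ≤ S := le_max_left _ _
    have hSN : S ≤ N := by omega
    rw [PySem.List.pyRange_one_append 1 S N h1S hSN]
    rw [loopA_append]
    · exact loopA_eq_loopB N _ (fun i hi => by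
        have := (PySem.List.mem_pyRange_one).mp hi; omega)
    · intro i hi
      have hmem := (PySem.List.mem_pyRange_one).mp hi
      have hi1 : 1 ≤ i := hmem.1
      have hiS : i < S := hmem.2
      have hiN : i < N - 90 := by
        rcases max_cases 1 (N - 90) with ⟨he, _⟩ | ⟨he, _⟩ <;> omega
      rw [strsum_eq i (by omega)]
      have hds : digitSumB i.toNat ≤ 90 := by
        have hb : i.toNat < 10 ^ 10 := by omega
        have := digitSumB_le 10 i.toNat hb
        omega
      omega
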